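-- pv_equiv track=rewrite | github.com/SkyCHarris/python_problems | easy/move_capitals_to_front.py | cap_to_front
-- ===== SOURCE A (Python) =====
-- def cap_to_front(str):
--     lowers = ''
--     uppers = ''
--     for i in str:
--         if i.islower():
--             lowers += i
--         elif i.isupper():
--             uppers += i
--     return uppers + lowers
-- ===== SOURCE B (Python) =====
-- def cap_to_front(str):
--     cased = [c for c in str if c.isupper() or c.islower()]
--     return ''.join(sorted(cased, key=lambda c: not c.isupper()))
-- ===== Notes on version B (the rewrite author's own statement) =====
-- stated objective: idiomatic
-- what changed: Replaces the two-accumulator string-building loop with a single filter to the cased letters followed by one stable sort on the boolean key 'not c.isupper()', so uppercase letters (key False) precede lowercase in original order.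
import Mathlib
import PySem

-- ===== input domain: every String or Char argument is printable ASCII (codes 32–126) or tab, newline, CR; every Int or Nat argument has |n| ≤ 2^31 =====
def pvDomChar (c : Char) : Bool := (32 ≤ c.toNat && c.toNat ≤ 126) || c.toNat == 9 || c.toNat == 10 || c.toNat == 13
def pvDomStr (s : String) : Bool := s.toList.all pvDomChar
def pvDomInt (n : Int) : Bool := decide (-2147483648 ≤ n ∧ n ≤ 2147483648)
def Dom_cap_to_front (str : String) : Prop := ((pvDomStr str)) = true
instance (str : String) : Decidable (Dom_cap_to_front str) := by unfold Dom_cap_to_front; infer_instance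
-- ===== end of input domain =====

-- B replaces A's two-accumulator partition loop by one filter to the cased letters plus a
-- stable sort on the key "not isupper" (idiomatic; same return value).


-- ===== PORT A =====
def cap_to_front (str : String) : String :=
  let r := str.toList.foldl
    (fun (acc : List Char × List Char) i =>
      if PySem.Chars.islower i then (acc.1 ++ [i], acc.2)
      else if PySem.Chars.isupper i then (acc.1, acc.2 ++ [i])
      else acc)
    ([], [])
  String.mk (r.2 ++ r.1)

-- ===== PORT B =====
-- Python's boolean key `not c.isupper()` ported as 0 for False (uppercase), 1 for True.
def capKey (c : Char) : Nat := if PySem.Chars.isupper c then 0 else 1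

def cap_to_front_alt (str : String) : String :=
  String.mk (PySem.List.sorted
    (str.toList.filter (fun c => PySem.Chars.isupper c || PySem.Chars.islower c))
    capKey false)

-- ===== PRECONDITION & SPEC =====
def Spec_cap_to_front (str : String) (out : String) : Prop := out = cap_to_front_alt str
instance (str : String) (out : String) : Decidable (Spec_cap_to_front str out) := by
  unfold Spec_cap_to_front; infer_instance

-- ===== CLAIM =====
def Claim_equal_cap_to_front : Prop :=
  ∀ (str : String), Dom_cap_to_front str → Spec_cap_to_front str (cap_to_front str)

-- ===== LEMMAS AND PROOFS =====
theorem islower_not_isupper (c : Char) (h : PySem.Chars.islower c = true) :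
    PySem.Chars.isupper c = false := by
  simp [PySem.Chars.islower, PySem.Chars.isupper, Char.le_def, UInt32.le_iff_toNat_le] at *
  omega

theorem insertBy_mid {α : Type} (before : α → α → Bool) (x : α) (U L : List α)
    (hU : ∀ y ∈ U, before x y = false) (hL : ∀ y ∈ L, before x y = true) :
    PySem.List.insertBy before x (U ++ L) = U ++ x :: L := by
  induction U with
  | nil =>
    cases L with
    | nil => rfl
    | cons l ls => simp [PySem.List.insertBy, hL l (by simp)]
  | cons u us ih =>
    simp only [List.cons_append, PySem.List.insertBy, hU u (by simp)]
    simp only [Bool.false_eq_true, if_false, List.cons.injEq, true_and]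
    exact ih (fun y hy => hU y (by simp [hy]))

theorem sorted_capKey (ys : List Char) :
    PySem.List.sorted ys capKey false =
      ys.filter (fun c => PySem.Chars.isupper c) ++
      ys.filter (fun c => !PySem.Chars.isupper c) := by
  rw [PySem.List.sorted_eq_foldl_insertBy]
  induction ys using List.reverseRecOn with
  | nil => rfl
  | append_singleton ys x ih =>
    rw [List.foldl_append, List.foldl_cons, List.foldl_nil, ih]
    by_cases hx : PySem.Chars.isupper x = true
    · rw [insertBy_mid]
      · simp [List.filter_append, hx]
      · intro y hy
        simp only [List.mem_filter] at hy
        simp [capKey, hx, hy.2]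
      · intro y hy
        simp only [List.mem_filter, Bool.not_eq_eq_eq_not, Bool.not_true] at hy
        simp [capKey, hx, hy.2]
    · rw [PySem.List.insertBy_of_forall_not_before]
      · simp [List.filter_append, hx]
      · intro y hy
        have : capKey y ≤ 1 := by unfold capKey; split <;> simp
        simp only [capKey, hx]
        simpa using this

theorem foldA (l : List Char) (lo up : List Char) :
    l.foldl
      (fun (acc : List Char × List Char) i =>
        if PySem.Chars.islower i then (acc.1 ++ [i], acc.2)
        else if PySem.Chars.isupper i then (acc.1, acc.2 ++ [i])
        else acc)
      (lo, up) =
      (lo ++ l.filter (fun c => PySem.Chars.islower c),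
       up ++ l.filter (fun c => PySem.Chars.isupper c)) := by
  induction l generalizing lo up with
  | nil => simp
  | cons c cs ih =>
    by_cases hl : PySem.Chars.islower c = true
    · have hu := islower_not_isupper c hl
      simp [hl, hu, ih]
    · by_cases hu : PySem.Chars.isupper c = true
      · simp [hl, hu, ih]
      · simp [hl, hu, ih]

theorem filter_cased_upper (l : List Char) :
    (l.filter (fun c => PySem.Chars.isupper c || PySem.Chars.islower c)).filter
        (fun c => PySem.Chars.isupper c) =
      l.filter (fun c => PySem.Chars.isupper c) := by
  rw [List.filter_filter]
  apply List.filter_congr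
  intro c _
  by_cases h : PySem.Chars.isupper c = true <;> simp [h]

theorem filter_cased_lower (l : List Char) :
    (l.filter (fun c => PySem.Chars.isupper c || PySem.Chars.islower c)).filter
        (fun c => !PySem.Chars.isupper c) =
      l.filter (fun c => PySem.Chars.islower c) := by
  rw [List.filter_filter]
  apply List.filter_congr
  intro c _
  by_cases h : PySem.Chars.islower c = true
  · simp [h, islower_not_isupper c h]
  · by_cases h' : PySem.Chars.isupper c = true <;> simp [h, h']

-- ===== VERDICT =====
theorem cap_to_front_spec : Claim_equal_cap_to_front := by
  intro str _
  unfold Spec_cap_to_front cap_to_front cap_to_front_alt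
  rw [sorted_capKey, filter_cased_upper, filter_cased_lower, foldA]
  simp
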